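-- pv_equiv track=rewrite | github.com/SachaWheeler/news | analyse_headlines.py | rank_headlines_by_top_words
-- ===== SOURCE A (Python) =====
-- def rank_headlines_by_top_words(headlines, top_words):
--     ranked_headlines = []
--
--     for headline in headlines:
--         count = sum(1 for word in top_words if word[0] in headline.lower())
--         if count > 0:
--             ranked_headlines.append((headline, count))
--
--     # Sort headlines by how many top words they contain (descending)
--     ranked_headlines.sort(key=lambda x: x[1], reverse=True)
--     return ranked_headlines
-- ===== SOURCE B (Python) =====
-- def rank_headlines_by_top_words(headlines, top_words):
--     # Counting sort by match count (counts are bounded by len(top_words));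
--     # headline.lower() is computed once per headline instead of once per word.
--     patterns = [w[0] for w in top_words]
--     buckets = [[] for _ in range(len(patterns) + 1)]
--     for headline in headlines:
--         low = headline.lower()
--         count = len([p for p in patterns if p in low])
--         buckets[count].append((headline, count))
--     result = []
--     for bucket in reversed(buckets[1:]):
--         result += bucket
--     return result
-- ===== Notes on version B (the rewrite author's own statement) =====
-- stated objective: faster
-- what changed: B replaces the comparison sort by a counting sort into buckets indexed by match count (emitted from highest count down, preserving input order as the stable reverse sort does) and hoists headline.lower() out of the per-word loop.
import Mathlib
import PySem

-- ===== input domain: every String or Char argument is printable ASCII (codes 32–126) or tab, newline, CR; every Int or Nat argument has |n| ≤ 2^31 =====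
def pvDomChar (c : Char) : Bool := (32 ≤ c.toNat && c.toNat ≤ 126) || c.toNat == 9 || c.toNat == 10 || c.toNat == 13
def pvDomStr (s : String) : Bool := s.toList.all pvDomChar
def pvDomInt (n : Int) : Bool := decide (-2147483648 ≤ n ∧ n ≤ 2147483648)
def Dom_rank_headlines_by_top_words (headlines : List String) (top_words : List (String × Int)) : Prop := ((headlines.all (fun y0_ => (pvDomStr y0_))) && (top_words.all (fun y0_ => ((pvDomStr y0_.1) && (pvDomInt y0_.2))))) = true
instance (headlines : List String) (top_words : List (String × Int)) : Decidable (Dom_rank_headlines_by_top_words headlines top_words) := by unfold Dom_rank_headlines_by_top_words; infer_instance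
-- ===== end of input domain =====

-- B replaces Python's comparison sort by a counting sort into buckets indexed by match
-- count and hoists headline.lower() out of the per-word loop (objective: faster, constant factor).


-- ===== PORT A =====
def rank_headlines_by_top_words (headlines : List String) (top_words : List (String × Int)) : List (String × Int) :=
  let ranked := headlines.foldl (fun acc headline =>
    let count : Int := top_words.foldl
      (fun s word => if PySem.Str.isIn word.1 (PySem.Str.lower headline) then s + 1 else s) 0
    if count > 0 then acc ++ [(headline, count)] else acc) []
  PySem.List.sorted ranked (fun x => x.2) true

-- ===== PORT B =====
def rank_headlines_by_top_words_alt (headlines : List String) (top_words : List (String × Int)) : List (String × Int) :=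
  let patterns := top_words.map (fun w => w.1)
  -- buckets[count].append(...) : the index count = length of a sublist of patterns is
  -- always < patterns.length + 1, so List.set / List.getD are exact here.
  let buckets := headlines.foldl (fun bs headline =>
      let low := PySem.Str.lower headline
      let count := (patterns.filter (fun p => PySem.Str.isIn p low)).length
      bs.set count (bs.getD count [] ++ [(headline, (count : Int))]))
    (List.replicate (patterns.length + 1) ([] : List (String × Int)))
  ((PySem.List.slice buckets (some 1) none).reverse).foldl (fun r bucket => r ++ bucket) []

-- ===== PRECONDITION & SPEC =====
def Spec_rank_headlines_by_top_words (headlines : List String) (top_words : List (String × Int)) (out : List (String × Int)) : Prop := out = rank_headlines_by_top_words_alt headlines top_words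
instance (headlines : List String) (top_words : List (String × Int)) (out : List (String × Int)) : Decidable (Spec_rank_headlines_by_top_words headlines top_words out) := by unfold Spec_rank_headlines_by_top_words; infer_instance

-- ===== CLAIM (what is proved, stated in full; the proofs are below) =====
def Claim_equal_rank_headlines_by_top_words : Prop := ∀ (headlines : List String) (top_words : List (String × Int)), Dom_rank_headlines_by_top_words headlines top_words → Spec_rank_headlines_by_top_words headlines top_words (rank_headlines_by_top_words headlines top_words)

-- ===== LEMMAS AND PROOFS =====

-- the number of top-word patterns contained in headline.lower()
def pvCnt (top_words : List (String × Int)) (h : String) : Nat :=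
  ((top_words.map (fun w => w.1)).filter (fun p => PySem.Str.isIn p (PySem.Str.lower h))).length

def pvPair (top_words : List (String × Int)) (h : String) : String × Int :=
  (h, (pvCnt top_words h : Int))

-- the per-count bucket, as a filter of the headline list
def pvBucket (top_words : List (String × Int)) (headlines : List String) (c : Nat) : List (String × Int) :=
  (headlines.filter (fun h => pvCnt top_words h == c)).map (pvPair top_words)

theorem pvCnt_le (tw : List (String × Int)) (h : String) : pvCnt tw h ≤ tw.length := by
  unfold pvCnt
  calc _ ≤ (tw.map (fun w => w.1)).length := List.length_filter_le _ _
  _ = tw.length := List.length_map ..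

theorem countA_eq (tw : List (String × Int)) (h : String) :
    ∀ s : Int, tw.foldl (fun s word => if PySem.Str.isIn word.1 (PySem.Str.lower h) then s + 1 else s) s
      = s + (pvCnt tw h : Int) := by
  induction tw with
  | nil => intro s; simp [pvCnt]
  | cons w tw ih =>
    intro s
    by_cases hw : PySem.Str.isIn w.1 (PySem.Str.lower h)
    · simp only [List.foldl_cons, if_pos, ih, pvCnt, List.map_cons, List.filter_cons, hw]
      simp
      ring
    · simp only [List.foldl_cons, hw, ih, pvCnt, List.map_cons, List.filter_cons]
      simp

theorem ranked_eq (tw : List (String × Int)) :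
    ∀ (hs : List String) (acc : List (String × Int)),
      hs.foldl (fun acc headline =>
        let count : Int := tw.foldl
          (fun s word => if PySem.Str.isIn word.1 (PySem.Str.lower headline) then s + 1 else s) 0
        if count > 0 then acc ++ [(headline, count)] else acc) acc
      = acc ++ (hs.filter (fun h => decide (0 < pvCnt tw h))).map (pvPair tw) := by
  intro hs
  induction hs with
  | nil => intro acc; simp
  | cons h hs ih =>
    intro acc
    simp only [List.foldl_cons, countA_eq tw h 0, List.filter_cons]
    by_cases hc : 0 < pvCnt tw h
    · have : (0 : Int) < (pvCnt tw h : Int) := by exact_mod_cast hc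
      simp only [zero_add, gt_iff_lt, this, if_pos, hc, decide_true, List.map_cons, ih, pvPair]
      simp
    · have : ¬ (0 : Int) < (pvCnt tw h : Int) := by exact_mod_cast hc
      simp only [zero_add, gt_iff_lt, this, hc, decide_false, ih]
      simp

theorem buckets_length (tw : List (String × Int)) :
    ∀ (hs : List String) (bs : List (List (String × Int))),
      (hs.foldl (fun bs headline =>
        let low := PySem.Str.lower headline
        let count := ((tw.map (fun w => w.1)).filter (fun p => PySem.Str.isIn p low)).length
        bs.set count (bs.getD count [] ++ [(headline, (count : Int))])) bs).length = bs.length := by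
  intro hs
  induction hs with
  | nil => intro bs; rfl
  | cons h hs ih => intro bs; simp only [List.foldl_cons, ih, List.length_set]

theorem buckets_getD (tw : List (String × Int)) :
    ∀ (hs : List String) (bs : List (List (String × Int))), bs.length = tw.length + 1 →
      ∀ c : Nat,
        (hs.foldl (fun bs headline =>
          let low := PySem.Str.lower headline
          let count := ((tw.map (fun w => w.1)).filter (fun p => PySem.Str.isIn p low)).length
          bs.set count (bs.getD count [] ++ [(headline, (count : Int))])) bs).getD c []
        = bs.getD c [] ++ pvBucket tw hs c := by
  intro hs
  induction hs with
  | nil => intro bs _ c; simp [pvBucket]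
  | cons h hs ih =>
    intro bs hlen c
    have hk : pvCnt tw h < bs.length := by
      have := pvCnt_le tw h; omega
    simp only [List.foldl_cons]
    rw [ih _ (by simp [hlen])]
    have hset : (bs.set (pvCnt tw h) (bs.getD (pvCnt tw h) [] ++ [(h, (pvCnt tw h : Int))])).getD c []
        = if pvCnt tw h = c then bs.getD c [] ++ [(h, (pvCnt tw h : Int))] else bs.getD c [] := by
      by_cases hec : pvCnt tw h = c
      · subst hec
        simp [List.getD_eq_getElem?_getD, hk]
      · simp [List.getD_eq_getElem?_getD, hec]
    show (bs.set (pvCnt tw h) (bs.getD (pvCnt tw h) [] ++ [(h, (pvCnt tw h : Int))])).getD c []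
        ++ pvBucket tw hs c = _
    rw [hset]
    unfold pvBucket
    rw [List.filter_cons]
    by_cases hec : pvCnt tw h = c
    · simp [hec, pvPair, List.append_assoc]
    · simp [hec]

theorem flatMap_congr2 {α β : Type} {l : List α} {f g : α → List β}
    (h : ∀ x ∈ l, f x = g x) : l.flatMap f = l.flatMap g := List.flatMap_congr h

theorem buckets_eq (tw : List (String × Int)) (hs : List String) :
    hs.foldl (fun bs headline =>
      let low := PySem.Str.lower headline
      let count := ((tw.map (fun w => w.1)).filter (fun p => PySem.Str.isIn p low)).length
      bs.set count (bs.getD count [] ++ [(headline, (count : Int))]))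
      (List.replicate (tw.length + 1) ([] : List (String × Int)))
    = (List.range (tw.length + 1)).map (pvBucket tw hs) := by
  have hlen : (hs.foldl (fun bs headline =>
      let low := PySem.Str.lower headline
      let count := ((tw.map (fun w => w.1)).filter (fun p => PySem.Str.isIn p low)).length
      bs.set count (bs.getD count [] ++ [(headline, (count : Int))]))
      (List.replicate (tw.length + 1) ([] : List (String × Int)))).length = tw.length + 1 := by
    rw [buckets_length]; simp
  apply List.ext_getElem?
  intro i
  by_cases hi : i < tw.length + 1
  · rw [List.getElem?_eq_getElem (by rw [hlen]; exact hi),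
        List.getElem?_eq_getElem (by simpa using hi)]
    rw [← List.getD_eq_getElem _ [] (by rw [hlen]; exact hi)]
    rw [buckets_getD tw hs _ (by simp) i]
    simp
  · rw [List.getElem?_eq_none (by rw [hlen]; simpa using hi),
        List.getElem?_eq_none (by simpa using hi)]

theorem insertBy_append {α : Type} (before : α → α → Bool) (x : α) :
    ∀ (u v : List α), (∀ y ∈ u, before x y = false) → (∀ y ∈ v, before x y = true) →
      PySem.List.insertBy before x (u ++ v) = u ++ x :: v := by
  intro u
  induction u with
  | nil =>
    intro v _ hv
    cases v with
    | nil => simp [PySem.List.insertBy]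
    | cons b t => simp [PySem.List.insertBy, hv b (by simp)]
  | cons a u ih =>
    intro v hu hv
    have ha : before x a = false := hu a (by simp)
    have step : PySem.List.insertBy before x (a :: (u ++ v))
        = a :: PySem.List.insertBy before x (u ++ v) := by
      simp [PySem.List.insertBy, ha]
    simp only [List.cons_append, step]
    rw [ih v (fun y hy => hu y (by simp [hy])) hv]

theorem sorted_buckets (cs : List Int) (hcs : cs.Pairwise (· > ·)) :
    ∀ ps : List (String × Int), (∀ p ∈ ps, p.2 ∈ cs) →
      PySem.List.sorted ps (fun x => x.2) true
        = cs.flatMap (fun c => ps.filter (fun p => p.2 == c)) := by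
  intro ps
  induction ps using List.reverseRecOn with
  | nil => intro _; simp [PySem.List.sorted]
  | append_singleton ps x ih =>
    intro hmem
    have hx : x.2 ∈ cs := hmem x (by simp)
    obtain ⟨A, B, hsplit⟩ := List.append_of_mem hx
    subst hsplit
    have hA : ∀ a ∈ A, a > x.2 := by
      intro a haA
      exact (List.pairwise_append.mp hcs).2.2 a haA x.2 (by simp)
    have hB : ∀ b ∈ B, x.2 > b := by
      intro b hbB
      exact (List.pairwise_cons.mp (List.pairwise_append.mp hcs).2.1).1 b hbB
    rw [PySem.List.sorted_rev_eq_foldl_insertBy, List.foldl_append]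
    simp only [List.foldl_cons, List.foldl_nil]
    rw [← PySem.List.sorted_rev_eq_foldl_insertBy]
    rw [ih (fun p hp => hmem p (by simp [hp]))]
    have key : PySem.List.insertBy (fun a b => decide (b.2 < a.2)) x
        ((A.flatMap (fun c => ps.filter (fun p => p.2 == c)) ++ ps.filter (fun p => p.2 == x.2))
          ++ B.flatMap (fun c => ps.filter (fun p => p.2 == c)))
        = (A.flatMap (fun c => ps.filter (fun p => p.2 == c)) ++ ps.filter (fun p => p.2 == x.2))
          ++ x :: B.flatMap (fun c => ps.filter (fun p => p.2 == c)) := by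
      apply insertBy_append
      · intro y hy
        rcases List.mem_append.mp hy with hy1 | hy2
        · obtain ⟨c, hcA, hyc⟩ := List.mem_flatMap.mp hy1
          have : y.2 = c := by simpa using (List.mem_filter.mp hyc).2
          have := hA c hcA
          simp only [decide_eq_false_iff_not]
          omega
        · have : y.2 = x.2 := by simpa using (List.mem_filter.mp hy2).2
          simp only [decide_eq_false_iff_not]
          omega
      · intro y hy
        obtain ⟨c, hcB, hyc⟩ := List.mem_flatMap.mp hy
        have : y.2 = c := by simpa using (List.mem_filter.mp hyc).2
        have := hB c hcB
        simp only [decide_eq_true_eq]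
        omega
    have hfA : A.flatMap (fun c => (ps ++ [x]).filter (fun p => p.2 == c))
        = A.flatMap (fun c => ps.filter (fun p => p.2 == c)) := by
      apply flatMap_congr2
      intro c hcA
      rw [List.filter_append]
      have : x.2 ≠ c := by have := hA c hcA; omega
      simp [this]
    have hfB : B.flatMap (fun c => (ps ++ [x]).filter (fun p => p.2 == c))
        = B.flatMap (fun c => ps.filter (fun p => p.2 == c)) := by
      apply flatMap_congr2
      intro c hcB
      rw [List.filter_append]
      have : x.2 ≠ c := by have := hB c hcB; omega
      simp [this]
    have hfx : (ps ++ [x]).filter (fun p => p.2 == x.2)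
        = ps.filter (fun p => p.2 == x.2) ++ [x] := by
      rw [List.filter_append]; simp
    simp only [List.flatMap_append, List.flatMap_cons]
    rw [hfA, hfB, hfx, ← List.append_assoc, key]
    simp

theorem csN_pairwise (n : Nat) :
    (List.map (fun c => Int.ofNat c) (((List.range n).map Nat.succ).reverse)).Pairwise (· > ·) := by
  rw [List.pairwise_map, List.pairwise_reverse, List.pairwise_map]
  exact List.pairwise_lt_range.imp
    (by intro a b h; simp only [Int.ofNat_eq_natCast, gt_iff_lt]; omega)

theorem ranked_filter_eq_bucket (tw : List (String × Int)) (hs : List String) (c : Nat)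
    (hc1 : 1 ≤ c) :
    ((hs.filter (fun h => decide (0 < pvCnt tw h))).map (pvPair tw)).filter
      (fun p => p.2 == (c : Int)) = pvBucket tw hs c := by
  rw [List.filter_map]
  unfold pvBucket
  rw [List.filter_filter]
  congr 1
  apply List.filter_congr
  intro h _
  simp only [Function.comp, pvPair]
  by_cases hec : pvCnt tw h = c
  · have h0 : 0 < pvCnt tw h := by omega
    simp [hec]
    omega
  · have h1 : ((pvCnt tw h : Int) == (c : Int)) = false := by
      simp only [beq_eq_false_iff_ne, ne_eq, Nat.cast_inj]
      exact hec
    have h2 : (pvCnt tw h == c) = false := by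
      simp only [beq_eq_false_iff_ne, ne_eq]
      exact hec
    simp [h1, h2]

-- ===== VERDICT (by name: the statement is the Claim_ definition above) =====
theorem rank_headlines_by_top_words_spec : Claim_equal_rank_headlines_by_top_words := by
  intro hs tw _
  show rank_headlines_by_top_words hs tw = rank_headlines_by_top_words_alt hs tw
  unfold rank_headlines_by_top_words rank_headlines_by_top_words_alt
  simp only [List.length_map]
  rw [ranked_eq tw hs [], buckets_eq tw hs]
  rw [PySem.List.slice_from _ (by norm_num)]
  show PySem.List.sorted ((hs.filter (fun h => decide (0 < pvCnt tw h))).map (pvPair tw))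
      (fun x => x.2) true
    = ((((List.range (tw.length + 1)).map (pvBucket tw hs)).drop (1:Int).toNat).reverse).foldl
        (fun r bucket => r ++ bucket) []
  have hB : ((((List.range (tw.length + 1)).map (pvBucket tw hs)).drop (1:Int).toNat).reverse).foldl
        (fun r bucket => r ++ bucket) []
      = (((List.range tw.length).map Nat.succ).reverse).flatMap (pvBucket tw hs) := by
    have h1 : ((List.range (tw.length + 1)).map (pvBucket tw hs)).drop (1:Int).toNat
        = ((List.range tw.length).map Nat.succ).map (pvBucket tw hs) := by
      rw [← List.map_drop]
      congr 1
      rw [List.range_succ_eq_map]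
      simp
    rw [h1, List.map_reverse.symm]
    have h2 := PySem.List.foldl_append_eq_flatMap (fun b => b)
      ((((List.range tw.length).map Nat.succ).reverse).map (pvBucket tw hs)) []
    simp only [List.nil_append] at h2
    rw [h2, List.flatMap_map]
  rw [hB]
  have hmem : ∀ p ∈ (hs.filter (fun h => decide (0 < pvCnt tw h))).map (pvPair tw),
      p.2 ∈ List.map (fun c => Int.ofNat c) (((List.range tw.length).map Nat.succ).reverse) := by
    intro p hp
    obtain ⟨h, hh, rfl⟩ := List.mem_map.mp hp
    have h0 : 0 < pvCnt tw h := by simpa using (List.mem_filter.mp hh).2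
    have hle : pvCnt tw h ≤ tw.length := pvCnt_le tw h
    simp only [pvPair]
    refine List.mem_map.mpr ⟨pvCnt tw h, ?_, rfl⟩
    rw [List.mem_reverse]
    exact List.mem_map.mpr ⟨pvCnt tw h - 1, List.mem_range.mpr (by omega), by omega⟩
  rw [sorted_buckets (List.map (fun c => Int.ofNat c) (((List.range tw.length).map Nat.succ).reverse))
      (csN_pairwise tw.length) _ hmem]
  rw [List.flatMap_map]
  apply flatMap_congr2
  intro c hc
  have hc1 : 1 ≤ c := by
    simp only [List.mem_reverse, List.mem_map, List.mem_range] at hc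
    obtain ⟨k, _, rfl⟩ := hc
    omega
  exact ranked_filter_eq_bucket tw hs c hc1
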